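-- pv_equiv track=rewrite | github.com/alanhon125/ldrs | dev_scripts/ts_merge_fa.py | judge_paragraph_lv
-- ===== SOURCE A (Python) =====
-- def judge_paragraph_lv(row):
--     judge_all = row['judge_all']
--     if any(i == 'TP' for i in judge_all):
--         return 'TP'
--     elif any(i == 'FP' for i in judge_all):
--         return 'FP'
--     elif all(i == 'TN' for i in judge_all):
--         return 'TN'
--     else:
--         return 'FN'
-- ===== SOURCE B (Python) =====
-- def judge_paragraph_lv(row):
--     has_tp = False
--     has_fp = False
--     all_tn = True
--     for i in row['judge_all']:
--         if i == 'TP':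
--             has_tp = True
--         elif i == 'FP':
--             has_fp = True
--         if i != 'TN':
--             all_tn = False
--     if has_tp:
--         return 'TP'
--     elif has_fp:
--         return 'FP'
--     elif all_tn:
--         return 'TN'
--     else:
--         return 'FN'
-- ===== Notes on version B (the rewrite author's own statement) =====
-- stated objective: simpler
-- what changed: Replaces the three separate any/any/all scans of judge_all by a single pass maintaining has_tp/has_fp/all_tn flags, then picks the label from the flags with the same TP>FP>TN>FN priority.
-- outside the precondition, e.g. on judge_paragraph_lv({}): A raises KeyError, B raises KeyError
import Mathlib
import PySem

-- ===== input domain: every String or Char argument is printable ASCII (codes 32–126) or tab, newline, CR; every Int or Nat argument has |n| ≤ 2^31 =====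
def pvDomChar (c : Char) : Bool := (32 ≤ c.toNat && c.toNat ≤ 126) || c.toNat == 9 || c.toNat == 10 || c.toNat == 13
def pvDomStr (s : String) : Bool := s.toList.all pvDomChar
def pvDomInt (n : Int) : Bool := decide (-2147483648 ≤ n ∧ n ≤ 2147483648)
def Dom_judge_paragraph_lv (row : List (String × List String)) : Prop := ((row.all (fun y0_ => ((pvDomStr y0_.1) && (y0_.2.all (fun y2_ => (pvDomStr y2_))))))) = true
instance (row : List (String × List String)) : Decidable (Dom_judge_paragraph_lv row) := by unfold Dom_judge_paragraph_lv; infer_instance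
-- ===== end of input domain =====

-- ===== PORT A =====
-- B replaces A's three separate any/any/all scans by one single-pass flag loop (objective: simpler).
def judge_paragraph_lv (row : List (String × List String)) : String :=
  let judge_all := (List.lookup "judge_all" row).getD []   -- row['judge_all']; Pre_ guarantees the key exists
  if judge_all.any (fun i => i == "TP") then "TP"
  else if judge_all.any (fun i => i == "FP") then "FP"
  else if judge_all.all (fun i => i == "TN") then "TN"
  else "FN"

-- ===== PORT B =====
def jplStep (st : Bool × Bool × Bool) (i : String) : Bool × Bool × Bool :=
  let st1 := if i == "TP" then (true, st.2.1, st.2.2)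
             else if i == "FP" then (st.1, true, st.2.2)
             else st
  if i != "TN" then (st1.1, st1.2.1, false) else st1

def judge_paragraph_lv_alt (row : List (String × List String)) : String :=
  let judge_all := (List.lookup "judge_all" row).getD []   -- row['judge_all']
  let s := judge_all.foldl jplStep (false, false, true)
  if s.1 then "TP"
  else if s.2.1 then "FP"
  else if s.2.2 then "TN"
  else "FN"

-- ===== PRECONDITION & SPEC =====
-- Pre_ excludes rows without a 'judge_all' key, on which Python's row['judge_all'] raises KeyError.
def Pre_judge_paragraph_lv (row : List (String × List String)) : Prop :=
  (List.lookup "judge_all" row).isSome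
instance (row : List (String × List String)) : Decidable (Pre_judge_paragraph_lv row) := by
  unfold Pre_judge_paragraph_lv; infer_instance
def pvWitness_judge_paragraph_lv : (List (String × List String)) := [("judge_all", ["TP", "TN"])]

def Spec_judge_paragraph_lv (row : List (String × List String)) (out : String) : Prop := out = judge_paragraph_lv_alt row
instance (row : List (String × List String)) (out : String) : Decidable (Spec_judge_paragraph_lv row out) := by unfold Spec_judge_paragraph_lv; infer_instance

-- ===== CLAIM (what is proved, stated in full; the proofs are below) =====
def Claim_equal_judge_paragraph_lv : Prop := ∀ (row : List (String × List String)), Dom_judge_paragraph_lv row → Pre_judge_paragraph_lv row → Spec_judge_paragraph_lv row (judge_paragraph_lv row)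

-- ===== LEMMAS AND PROOFS =====
-- One step of B's fold updates the three flags exactly as one element of A's three scans.
theorem jplStep_eq (st : Bool × Bool × Bool) (x : String) :
    jplStep st x = (st.1 || (x == "TP"), st.2.1 || (x == "FP"), st.2.2 && (x == "TN")) := by
  obtain ⟨a, b, c⟩ := st
  unfold jplStep
  by_cases h1 : x = "TP"
  · subst h1; simp
  · by_cases h2 : x = "FP"
    · subst h2; simp
    · by_cases h3 : x = "TN"
      · subst h3; simp
      · simp [h1, h2, h3]

-- The single-pass fold computes exactly the three scans A performs.
theorem jplFold_char (l : List String) (a b c : Bool) :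
    l.foldl jplStep (a, b, c)
      = (a || l.any (fun i => i == "TP"), b || l.any (fun i => i == "FP"),
         c && l.all (fun i => i == "TN")) := by
  induction l generalizing a b c with
  | nil => simp
  | cons x xs ih =>
      simp only [List.foldl_cons, List.any_cons, List.all_cons, jplStep_eq]
      rw [ih]
      simp [Bool.or_assoc, Bool.and_assoc]

-- ===== VERDICT (by name: the statement is the Claim_ definition above) =====
theorem judge_paragraph_lv_spec : Claim_equal_judge_paragraph_lv := by
  intro row _ _
  unfold Spec_judge_paragraph_lv judge_paragraph_lv judge_paragraph_lv_alt
  simp only [jplFold_char, Bool.false_or, Bool.true_and]
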